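-- pv_equiv track=rewrite | github.com/andrewha/mds2022 | Data Scraping/imdb_helper_functions.py | get_text_from_actor_descriptions
-- ===== SOURCE A (Python) =====
-- def get_text_from_actor_descriptions(actor_descriptions: list[str]) -> str:
--     '''
--     Construct one text from the list of all actor's movies descriptions.
--
--     Parameters
--     ----------
--     actor_descriptions : list[str]
--         All actor's movies descriptions.
--
--     Returns
--     -------
--     One text from all actor's movies descriptions as a string.
--     '''
--     raw_actor_text = ''
--     for actor_description in actor_descriptions:
--         actor_description = actor_description.strip('\n')
--         raw_actor_text = f'{raw_actor_text}{actor_description} '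
--     # Clean the raw text by keeping only letters in words
--     actor_text = ''
--     for word in raw_actor_text.split():
--         word = ''.join(filter(str.isalpha, word))
--         actor_text = f'{actor_text}{word} '
--     return actor_text
-- ===== SOURCE B (Python) =====
-- def get_text_from_actor_descriptions(actor_descriptions: list[str]) -> str:
--     '''Single character-level state machine: no intermediate concatenated raw
--     string and no split() pass.  Walk the characters of each newline-stripped
--     description once, keeping the letters of the word in progress; a whitespace
--     character (or the end of a description, which A follows with a space) emits
--     the cleaned word plus one space.'''
--     pieces = []
--     cur = None  # None = between words; else list of kept letters of the current word
--     for desc in actor_descriptions: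
--         for c in desc.strip('\n'):
--             if c.isspace():
--                 if cur is not None:
--                     pieces.append(''.join(cur))
--                     pieces.append(' ')
--                     cur = None
--             else:
--                 if cur is None:
--                     cur = []
--                 if c.isalpha():
--                     cur.append(c)
--         if cur is not None:
--             pieces.append(''.join(cur))
--             pieces.append(' ')
--             cur = None
--     return ''.join(pieces)
-- ===== Notes on version B (the rewrite author's own statement) =====
-- stated objective: faster
-- what changed: B replaces A's two staged passes (build a concatenated raw string by repeated concatenation, then split it and rebuild by repeated concatenation) with a single character-level state machine: it walks each description's characters once, maintaining the letters of the word in progress and a between-words/in-word state, emitting cleaned word + space at each whitespace boundary, with no intermediate raw string and no split() pass.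
import Mathlib
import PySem

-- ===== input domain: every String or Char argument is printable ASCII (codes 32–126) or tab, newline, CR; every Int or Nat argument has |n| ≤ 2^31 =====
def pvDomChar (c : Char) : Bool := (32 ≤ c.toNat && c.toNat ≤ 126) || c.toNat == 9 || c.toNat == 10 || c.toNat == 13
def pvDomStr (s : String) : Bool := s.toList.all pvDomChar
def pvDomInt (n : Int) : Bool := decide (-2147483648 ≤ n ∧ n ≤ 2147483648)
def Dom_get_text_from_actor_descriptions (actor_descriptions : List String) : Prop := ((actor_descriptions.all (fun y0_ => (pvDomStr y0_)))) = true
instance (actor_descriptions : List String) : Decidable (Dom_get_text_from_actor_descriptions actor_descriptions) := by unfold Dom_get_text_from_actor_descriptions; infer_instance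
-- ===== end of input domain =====

-- B replaces A's build-raw-string-then-split passes by a single character-level state
-- machine (objective: faster; avoids A's quadratic repeated concatenation).


-- ===== PORT A =====
-- ''.join(filter(str.isalpha, word)) is ported as String.ofList (word.toList.filter PySem.Chars.isalpha)
-- (filter over the word's characters, rebuilt into a string) — exact on the ASCII domain.
def get_text_from_actor_descriptions (actor_descriptions : List String) : String :=
  let raw_actor_text := actor_descriptions.foldl
    (fun raw_actor_text actor_description =>
      raw_actor_text ++ PySem.Str.stripChars actor_description "\n" ++ " ") ""
  (PySem.Str.split₀ raw_actor_text).foldl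
    (fun actor_text word =>
      actor_text ++ String.ofList (word.toList.filter PySem.Chars.isalpha) ++ " ") ""

-- ===== PORT B =====
-- One step of Source B's inner character loop: state = (pieces so far, current word:
-- none = between words, some w = in a word whose kept letters are w).
def pvStep (st : List String × Option (List Char)) (c : Char) :
    List String × Option (List Char) :=
  if PySem.Chars.isspace c then
    match st.2 with
    | some w => (st.1 ++ [String.ofList w, " "], none)
    | none => st
  else
    (st.1, some ((st.2.getD []) ++ if PySem.Chars.isalpha c then [c] else []))

def get_text_from_actor_descriptions_alt (actor_descriptions : List String) : String :=
  let st := actor_descriptions.foldl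
    (fun st d =>
      let st2 := (PySem.Str.stripChars d "\n").toList.foldl pvStep st
      match st2.2 with
      | some w => (st2.1 ++ [String.ofList w, " "], none)
      | none => st2)
    ([], none)
  PySem.Str.join "" st.1

-- ===== PRECONDITION & SPEC =====
def Spec_get_text_from_actor_descriptions (actor_descriptions : List String) (out : String) : Prop := out = get_text_from_actor_descriptions_alt actor_descriptions
instance (actor_descriptions : List String) (out : String) : Decidable (Spec_get_text_from_actor_descriptions actor_descriptions out) := by unfold Spec_get_text_from_actor_descriptions; infer_instance

-- ===== CLAIM (what is proved, stated in full; the proofs are below) =====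
def Claim_equal_get_text_from_actor_descriptions : Prop := ∀ (actor_descriptions : List String), Dom_get_text_from_actor_descriptions actor_descriptions → Spec_get_text_from_actor_descriptions actor_descriptions (get_text_from_actor_descriptions actor_descriptions)

-- ===== LEMMAS AND PROOFS =====

-- split₀.go with a pre-filled accumulator prepends that accumulator (reversed).
theorem pv_go_acc : ∀ (s cur : List Char) (acc : List (List Char)),
    PySem.Chars.split₀.go s cur acc = acc.reverse ++ PySem.Chars.split₀.go s cur [] := by
  intro s
  induction s with
  | nil =>
    intro cur acc
    simp only [PySem.Chars.split₀.go]
    split_ifs <;> simp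
  | cons c rest ih =>
    intro cur acc
    simp only [PySem.Chars.split₀.go]
    split_ifs with h1 h2
    · exact ih [] acc
    · rw [ih [] (cur.reverse :: acc), ih [] [cur.reverse]]
      simp
    · exact ih (c :: cur) acc

-- a space splits: the words of `a ++ ' ' :: b` are the words of `a` then the words of `b`
theorem pv_go_space : ∀ (a b cur : List Char) (acc : List (List Char)),
    PySem.Chars.split₀.go (a ++ ' ' :: b) cur acc
      = PySem.Chars.split₀.go a cur acc ++ PySem.Chars.split₀ b := by
  intro a
  induction a with
  | nil =>
    intro b cur acc
    simp only [List.nil_append, PySem.Chars.split₀.go, PySem.Chars.split₀]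
    have hsp : PySem.Chars.isspace ' ' = true := by decide
    rw [hsp]
    simp only [if_true]
    split_ifs with h1
    · rw [pv_go_acc b [] acc]
    · rw [pv_go_acc b [] (cur.reverse :: acc)]
  | cons c rest ih =>
    intro b cur acc
    simp only [List.cons_append, PySem.Chars.split₀.go]
    split_ifs with h1 h2
    · exact ih b [] acc
    · exact ih b [] (cur.reverse :: acc)
    · exact ih b (c :: cur) acc

theorem pv_split_space : ∀ (a b : List Char),
    PySem.Chars.split₀ (a ++ ' ' :: b) = PySem.Chars.split₀ a ++ PySem.Chars.split₀ b := by
  intro a b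
  simp only [PySem.Chars.split₀]
  exact pv_go_space a b [] []

theorem pv_split_flat : ∀ (ps : List (List Char)),
    PySem.Chars.split₀ ((ps.map (· ++ [' '])).flatten) = ps.flatMap PySem.Chars.split₀ := by
  intro ps
  induction ps with
  | nil => rfl
  | cons p ps ih =>
    have : ((p :: ps).map (· ++ [' '])).flatten = p ++ ' ' :: (ps.map (· ++ [' '])).flatten := by
      simp
    rw [this, pv_split_space, ih, List.flatMap_cons]

theorem pv_rawfold : ∀ (ads : List String) (acc : String),
    (ads.foldl (fun r d => r ++ PySem.Str.stripChars d "\n" ++ " ") acc).toList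
      = acc.toList ++ ((ads.map (fun d => PySem.Chars.stripChars d.toList ['\n'])).map (· ++ [' '])).flatten := by
  intro ads
  induction ads with
  | nil => simp
  | cons d ads ih =>
    intro acc
    simp only [List.foldl_cons, List.map_cons, List.flatten_cons]
    rw [ih]
    simp [PySem.Str.toList_stripChars]

theorem pv_wordfold : ∀ (ws : List String) (acc : String),
    (ws.foldl (fun a w => a ++ String.ofList (w.toList.filter PySem.Chars.isalpha) ++ " ") acc).toList
      = acc.toList ++ (ws.map (fun w => w.toList.filter PySem.Chars.isalpha ++ [' '])).flatten := by
  intro ws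
  induction ws with
  | nil => simp
  | cons w ws ih =>
    intro acc
    simp only [List.foldl_cons, List.map_cons, List.flatten_cons]
    rw [ih]
    simp

theorem pv_intercalate_nil (ps : List (List Char)) : List.intercalate [] ps = ps.flatten := by
  induction ps with
  | nil => rfl
  | cons p ps ih =>
    cases ps with
    | nil => simp [List.intercalate]
    | cons q qs =>
      simp only [List.intercalate, List.intersperse] at *
      simp_all

-- B-side: abstract state pieces machine cur from the reversed in-progress word rc of split₀.go
def pvCur (rc : List Char) : Option (List Char) :=
  if rc.isEmpty then none else some (rc.reverse.filter PySem.Chars.isalpha)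

def pvFlush (st : List String × Option (List Char)) : List String :=
  match st.2 with
  | some w => st.1 ++ [String.ofList w, " "]
  | none => st.1

-- the state machine run over l, then flushed, produces exactly the cleaned words of split₀.go
theorem pv_machine : ∀ (l rc : List Char) (out : List String),
    pvFlush (l.foldl pvStep (out, pvCur rc))
      = out ++ ((PySem.Chars.split₀.go l rc []).map
          (fun w => [String.ofList (w.filter PySem.Chars.isalpha), " "])).flatten := by
  intro l
  induction l with
  | nil =>
    intro rc out
    simp only [List.foldl_nil, PySem.Chars.split₀.go, pvFlush, pvCur]
    split_ifs with h
    · simp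
    · simp
  | cons c rest ih =>
    intro rc out
    simp only [List.foldl_cons, PySem.Chars.split₀.go]
    by_cases hsp : PySem.Chars.isspace c = true
    · rw [hsp]
      simp only [if_true]
      by_cases hrc : rc.isEmpty = true
      · rw [if_pos hrc]
        have hstep : pvStep (out, pvCur rc) c = (out, pvCur []) := by
          simp [pvStep, pvCur, hsp, hrc]
        rw [hstep, ih]
      · rw [if_neg hrc]
        have hstep : pvStep (out, pvCur rc) c
            = (out ++ [String.ofList (rc.reverse.filter PySem.Chars.isalpha), " "], pvCur []) := by
          simp [pvStep, pvCur, hsp, hrc]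
        rw [hstep, ih, pv_go_acc rest [] [rc.reverse]]
        simp
    · rw [if_neg hsp]
      have hstep : pvStep (out, pvCur rc) c = (out, pvCur (c :: rc)) := by
        simp only [pvStep, hsp, if_neg, Bool.false_eq_true, not_false_iff]
        have hgetD : (pvCur rc).getD [] = rc.reverse.filter PySem.Chars.isalpha := by
          simp only [pvCur]
          split_ifs with h
          · have : rc = [] := List.isEmpty_iff.mp h
            simp [this]
          · rfl
        rw [hgetD]
        have : pvCur (c :: rc)
            = some (rc.reverse.filter PySem.Chars.isalpha ++ if PySem.Chars.isalpha c then [c] else []) := by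
          simp only [pvCur, List.isEmpty_cons, if_neg, Bool.false_eq_true, not_false_iff,
            List.reverse_cons, List.filter_append]
          congr 1
          cases h : PySem.Chars.isalpha c <;> simp [List.filter, h]
        rw [this]
      rw [hstep, ih]

-- one description step of B's outer loop = flush the inner run, reset to between-words
theorem pv_flush_match (st2 : List String × Option (List Char)) :
    (match st2.2 with
     | some w => (st2.1 ++ [String.ofList w, " "], none)
     | none => st2) = (pvFlush st2, none) := by
  obtain ⟨a, o⟩ := st2
  cases o <;> simp [pvFlush]

theorem pv_outer : ∀ (ads : List String) (out : List String),
    ads.foldl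
      (fun st d =>
        let st2 := (PySem.Str.stripChars d "\n").toList.foldl pvStep st
        match st2.2 with
        | some w => (st2.1 ++ [String.ofList w, " "], none)
        | none => st2)
      (out, none)
      = (out ++ (ads.map (fun d =>
          ((PySem.Chars.split₀ (PySem.Chars.stripChars d.toList ['\n'])).map
            (fun w => [String.ofList (w.filter PySem.Chars.isalpha), " "])).flatten)).flatten,
         none) := by
  intro ads
  induction ads with
  | nil => intro out; simp
  | cons d ads ih =>
    intro out
    simp only [List.foldl_cons, List.map_cons, List.flatten_cons]
    rw [pv_flush_match]
    have hl : (PySem.Str.stripChars d "\n").toList = PySem.Chars.stripChars d.toList ['\n'] := by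
      rw [PySem.Str.toList_stripChars]; rfl
    have hm := pv_machine (PySem.Str.stripChars d "\n").toList [] out
    simp only [pvCur, List.isEmpty_nil, if_true] at hm
    rw [hm, hl]
    simp only [PySem.Chars.split₀] at *
    rw [ih]
    simp

theorem pv_piece (ws : List (List Char)) :
    (List.map String.toList
        (List.map (fun w => [String.ofList (List.filter PySem.Chars.isalpha w), " "]) ws).flatten).flatten
      = (List.map (fun l => List.filter PySem.Chars.isalpha l ++ [' ']) ws).flatten := by
  induction ws with
  | nil => rfl
  | cons w ws ih =>
    have hsp : (" " : String).toList = [' '] := rfl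
    simp only [List.map_cons, List.flatten_cons,
      List.cons_append, List.nil_append, String.toList_ofList, hsp, ih]
    simp

-- ===== VERDICT (by name: the statement is the Claim_ definition above) =====
theorem get_text_from_actor_descriptions_spec : Claim_equal_get_text_from_actor_descriptions := by
  intro ads hdom
  clear hdom
  unfold Spec_get_text_from_actor_descriptions
  apply String.toList_inj.mp
  unfold get_text_from_actor_descriptions get_text_from_actor_descriptions_alt
  simp only [pv_wordfold, pv_outer, PySem.Str.toList_join, PySem.Chars.join]
  have hnil : ("" : String).toList = ([] : List Char) := rfl
  rw [hnil, pv_intercalate_nil, List.nil_append]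
  have hraw : (List.foldl (fun r d => r ++ PySem.Str.stripChars d "\n" ++ " ") "" ads).toList
      = ((ads.map (fun d => PySem.Chars.stripChars d.toList ['\n'])).map (· ++ [' '])).flatten := by
    rw [pv_rawfold, hnil, List.nil_append]
  have hMap : ∀ s : String,
      List.map (fun w : String => List.filter PySem.Chars.isalpha w.toList ++ [' ']) (PySem.Str.split₀ s)
        = List.map (fun l => List.filter PySem.Chars.isalpha l ++ [' ']) (PySem.Chars.split₀ s.toList) := by
    intro s
    rw [← PySem.Str.split₀_map_toList, List.map_map]
    rfl
  rw [hMap, hraw, pv_split_flat]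
  rw [List.nil_append]
  clear hraw hMap hnil
  induction ads with
  | nil => rfl
  | cons d ds ih =>
    simp only [List.map_cons, List.flatMap_cons, List.map_append, List.flatten_cons,
      List.flatten_append]
    rw [ih, pv_piece]
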